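-- pv_equiv track=rewrite | github.com/Siddhant-Thendral-Arasu/UTD-AI-Safety-Lab-Work | DatasetCreation/builderfiles/format_covernet_dataset.py | _episode_groups
-- ===== SOURCE A (Python) =====
-- from typing import Dict, List, Tuple, Optional
--
-- def _episode_groups(frames: Dict[int, dict]) -> Dict[Optional[int], List[int]]:
--     groups: Dict[Optional[int], List[int]] = {}
--     for idx, fm in frames.items():
--         ep = (fm.get("metadata") or {}).get("episode_id")
--         groups.setdefault(ep, []).append(idx)
--     for idxs in groups.values():
--         idxs.sort()
--     return groups
-- ===== SOURCE B (Python) =====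
-- from typing import Dict, List, Tuple, Optional
--
-- def _episode_groups(frames: Dict[int, dict]) -> Dict[Optional[int], List[int]]:
--     # Single pass: keep every bucket sorted on arrival by splicing each index in
--     # at its sorted position (scanning from the right end, so ascending arrivals
--     # cost O(1) scan); no second sort pass over the groups.
--     groups: Dict[Optional[int], List[int]] = {}
--     for idx, fm in frames.items():
--         ep = (fm.get("metadata") or {}).get("episode_id")
--         bucket = groups.get(ep)
--         if bucket is None:
--             groups[ep] = [idx]
--         else:
--             i = len(bucket)
--             while i > 0 and bucket[i - 1] > idx:
--                 i -= 1
--             bucket.insert(i, idx)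
--     return groups
-- ===== Notes on version B (the rewrite author's own statement) =====
-- stated objective: alternative
-- what changed: B keeps every bucket sorted on arrival by splicing each index in at its sorted position (scanning from the bucket's right end) during the single grouping pass, replacing A's append-everything-then-sort-each-bucket second pass.
import Mathlib
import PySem

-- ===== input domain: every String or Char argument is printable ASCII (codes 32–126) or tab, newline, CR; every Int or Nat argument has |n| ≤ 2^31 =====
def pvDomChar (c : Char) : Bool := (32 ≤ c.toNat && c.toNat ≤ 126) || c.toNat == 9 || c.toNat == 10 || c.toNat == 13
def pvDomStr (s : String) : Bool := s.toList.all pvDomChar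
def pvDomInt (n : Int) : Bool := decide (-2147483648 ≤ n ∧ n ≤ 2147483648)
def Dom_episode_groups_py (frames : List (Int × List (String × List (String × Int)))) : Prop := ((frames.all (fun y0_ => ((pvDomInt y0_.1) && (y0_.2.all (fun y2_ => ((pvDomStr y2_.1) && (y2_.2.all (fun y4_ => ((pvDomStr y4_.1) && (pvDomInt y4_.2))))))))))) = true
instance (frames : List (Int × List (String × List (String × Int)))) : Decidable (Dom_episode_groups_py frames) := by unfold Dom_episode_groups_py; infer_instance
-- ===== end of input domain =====

-- B replaces A's append-then-sort-each-bucket second pass by keeping every bucket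
-- sorted on arrival (sorted-position splice during the single grouping pass);
-- same cost class, no speed claim; A mutates nothing observable.

-- ===== PORT A =====
-- ep = (fm.get("metadata") or {}).get("episode_id")   (shared by both Pythons verbatim)
-- 'or {}': fm.get returns None → {}; a present empty dict also yields {} — identical lookup result,
-- so Option.getD [] is exact here.
def fmEp (fm : List (String × List (String × Int))) : Option Int :=
  (PySem.Dict.ofList (((PySem.Dict.ofList fm).get? "metadata").getD [])).get? "episode_id"

def episode_groups_py (frames : List (Int × List (String × List (String × Int)))) : List (Option Int × List Int) :=
  -- groups.setdefault(ep, []).append(idx)  ==  groups[ep] = groups.get(ep, []) + [idx]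
  let groups := ((PySem.Dict.ofList frames).items).foldl
      (fun g q => g.modify (fmEp q.2) [] (fun b => b ++ [q.1])) PySem.Dict.empty
  -- for idxs in groups.values(): idxs.sort()   (in-place sort of each bucket, keys unchanged)
  groups.items.map (fun p => (p.1, PySem.List.sorted p.2 (fun x => x) false))

-- ===== PORT B =====
-- the while loop 'i = len(bucket); while i > 0 and bucket[i-1] > idx: i -= 1; bucket.insert(i, idx)':
-- walk the bucket from its right end (rb = the part still to scan, reversed), carrying the
-- already-scanned suffix 'tail' of elements > idx, and splice idx in where the scan stops
def pvSpliceDesc (idx : Int) : List Int → List Int → List Int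
  | [], tail => idx :: tail
  | y :: rb, tail => if idx < y then pvSpliceDesc idx rb (y :: tail) else (y :: rb).reverse ++ idx :: tail

def pvInsertFromRight (idx : Int) (b : List Int) : List Int := pvSpliceDesc idx b.reverse []

def episode_groups_py_alt (frames : List (Int × List (String × List (String × Int)))) : List (Option Int × List Int) :=
  (((PySem.Dict.ofList frames).items).foldl
    (fun g q =>
      let ep := fmEp q.2
      match g.get? ep with
      | none => g.insert ep [q.1]
      | some b => g.insert ep (pvInsertFromRight q.1 b))
    PySem.Dict.empty).items

-- ===== PRECONDITION & SPEC =====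
def Spec_episode_groups_py (frames : List (Int × List (String × List (String × Int)))) (out : List (Option Int × List Int)) : Prop := out = episode_groups_py_alt frames
instance (frames : List (Int × List (String × List (String × Int)))) (out : List (Option Int × List Int)) : Decidable (Spec_episode_groups_py frames out) := by unfold Spec_episode_groups_py; infer_instance

-- ===== CLAIM (what is proved, stated in full; the proofs are below) =====
def Claim_equal_episode_groups_py : Prop := ∀ (frames : List (Int × List (String × List (String × Int)))), Dom_episode_groups_py frames → Spec_episode_groups_py frames (episode_groups_py frames)

-- ===== LEMMAS AND PROOFS =====

-- insertBy past a strictly larger last element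
theorem insertBy_append_singleton (x y : Int) (xs : List Int) (h : x < y) :
    PySem.List.insertBy (fun a c => decide (a < c)) x (xs ++ [y])
      = PySem.List.insertBy (fun a c => decide (a < c)) x xs ++ [y] := by
  induction xs with
  | nil => simp [PySem.List.insertBy, h]
  | cons z zs ih =>
    by_cases hz : x < z <;> simp [PySem.List.insertBy, hz, ih]

-- the right-to-left splice scan IS insertBy once the scanned part is descending
theorem spliceDesc_eq_insertBy (idx : Int) (rb tail : List Int)
    (h : rb.Pairwise (fun a b => b ≤ a)) :
    pvSpliceDesc idx rb tail
      = PySem.List.insertBy (fun a c => decide (a < c)) idx rb.reverse ++ tail := by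
  induction rb generalizing tail with
  | nil => simp [pvSpliceDesc, PySem.List.insertBy]
  | cons y rb ih =>
    rw [List.pairwise_cons] at h
    by_cases hlt : idx < y
    · simp only [pvSpliceDesc, if_pos hlt, List.reverse_cons]
      rw [ih (y :: tail) h.2, insertBy_append_singleton idx y _ hlt]
      simp
    · simp only [pvSpliceDesc, if_neg hlt, List.reverse_cons]
      rw [PySem.List.insertBy_of_forall_not_before]
      · simp
      · intro z hz
        rcases List.mem_append.1 hz with hz | hz
        · have := h.1 z (List.mem_reverse.1 hz)
          simp; omega
        · simp at hz; subst hz; simp; omega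

-- on a sorted bucket the splice from the right equals insertBy
theorem insertFromRight_eq_insertBy (idx : Int) (b : List Int)
    (h : b.Pairwise (fun a c => a ≤ c)) :
    pvInsertFromRight idx b = PySem.List.insertBy (fun a c => decide (a < c)) idx b := by
  unfold pvInsertFromRight
  rw [spliceDesc_eq_insertBy idx b.reverse [] (by simpa [List.pairwise_reverse] using h)]
  simp

-- folding B's splice from the empty bucket is folding insertBy (each accumulator is sorted)
theorem foldl_insertFromRight_eq (l : List Int) :
    l.foldl (fun acc x => pvInsertFromRight x acc) []
      = l.foldl (fun acc x => PySem.List.insertBy (fun a c => decide (a < c)) x acc) [] := by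
  induction l using List.reverseRecOn with
  | nil => rfl
  | append_singleton l x ih =>
    rw [List.foldl_append, List.foldl_append, ih]
    simp only [List.foldl_cons, List.foldl_nil]
    have hs : (l.foldl (fun acc x => PySem.List.insertBy (fun a c => decide (a < c)) x acc) []).Pairwise (fun a c => a ≤ c) := by
      have := PySem.List.sorted_pairwise l (fun x => x)
      rwa [PySem.List.sorted_eq_foldl_insertBy] at this
    exact insertFromRight_eq_insertBy x _ hs

-- B's step (get / branch / overwrite-insert) is exactly a modify with the splice.
theorem stepB_eq_modify (g : PySem.Dict (Option Int) (List Int)) (ep : Option Int) (idx : Int) :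
    (match g.get? ep with
      | none => g.insert ep [idx]
      | some b => g.insert ep (pvInsertFromRight idx b))
    = g.modify ep [] (fun b => pvInsertFromRight idx b) := by
  cases h : g.get? ep with
  | none => simp [PySem.Dict.modify, PySem.Dict.getD_eq_get?_getD, h, pvInsertFromRight, pvSpliceDesc]
  | some b => simp [PySem.Dict.modify, PySem.Dict.getD_eq_get?_getD, h]

-- a fold of splice-modifies, read back at one key
theorem getD_foldl_modify_splice (l : List (Option Int × Int))
    (d : PySem.Dict (Option Int) (List Int)) (c : Option Int) :
    (l.foldl (fun d p => d.modify p.1 [] (fun b => pvInsertFromRight p.2 b)) d).getD c []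
    = ((l.filter (fun p => p.1 == c)).map (·.2)).foldl
        (fun acc x => pvInsertFromRight x acc) (d.getD c []) := by
  induction l generalizing d with
  | nil => rfl
  | cons a t ih =>
    simp only [List.foldl_cons, List.filter_cons]
    rw [ih]
    by_cases hc : a.1 = c
    · simp [hc]
    · have hb : (a.1 == c) = false := by simpa using hc
      have hne : c ≠ a.1 := fun h => hc h.symm
      simp [hb, PySem.Dict.getD_modify, hne]

theorem episode_groups_py_spec' (frames : List (Int × List (String × List (String × Int)))) :
    episode_groups_py frames = episode_groups_py_alt frames := by
  unfold episode_groups_py episode_groups_py_alt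
  set items := (PySem.Dict.ofList frames).items with hitems
  simp only [stepB_eq_modify]
  -- both folds over `items`, A with append, B with the splice; rewrite them as folds over key/idx pairs
  set l : List (Option Int × Int) := items.map (fun q => (fmEp q.2, q.1)) with hl
  have hA : items.foldl (fun g q => g.modify (fmEp q.2) [] (fun b => b ++ [q.1])) PySem.Dict.empty
      = l.foldl (fun g p => g.modify p.1 [] (fun b => b ++ [p.2])) PySem.Dict.empty := by
    rw [hl, List.foldl_map]
  have hB : items.foldl (fun g q => g.modify (fmEp q.2) [] (fun b => pvInsertFromRight q.1 b)) PySem.Dict.empty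
      = l.foldl (fun g p => g.modify p.1 [] (fun b => pvInsertFromRight p.2 b)) PySem.Dict.empty := by
    rw [hl, List.foldl_map]
  rw [hA, hB]
  set dA := l.foldl (fun g p => g.modify p.1 [] (fun b => b ++ [p.2])) PySem.Dict.empty with hdA
  set dB := l.foldl (fun g p => g.modify p.1 [] (fun b => pvInsertFromRight p.2 b)) PySem.Dict.empty with hdB
  have hndA : dA.keys.Nodup := by
    rw [hdA]
    exact PySem.Dict.nodup_keys_foldl_modify_key l (fun p => p.1) [] (fun d p b => b ++ [p.2]) _ PySem.Dict.nodup_keys_empty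
  have hndB : dB.keys.Nodup := by
    rw [hdB]
    exact PySem.Dict.nodup_keys_foldl_modify_key l (fun p => p.1) []
      (fun d p b => pvInsertFromRight p.2 b) _ PySem.Dict.nodup_keys_empty
  have hkeys : dA.keys = dB.keys := by
    rw [hdA, hdB,
      PySem.Dict.keys_foldl_modify_key l (fun p => p.1) [] (fun d p b => b ++ [p.2]),
      PySem.Dict.keys_foldl_modify_key l (fun p => p.1) [] (fun d p b => pvInsertFromRight p.2 b)]
  rw [PySem.Dict.items_eq_map_keys dA hndA [], PySem.Dict.items_eq_map_keys dB hndB [], hkeys, List.map_map]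
  refine List.map_congr_left (fun k hk => ?_)
  simp only [Function.comp]
  have hvA : dA.getD k [] = (l.filter (fun p => p.1 == k)).map (·.2) := by
    rw [hdA, PySem.Dict.getD_foldl_modify_append l PySem.Dict.empty k]
    simp [PySem.Dict.getD_empty]
  have hvB : dB.getD k []
      = ((l.filter (fun p => p.1 == k)).map (·.2)).foldl
          (fun acc x => pvInsertFromRight x acc) [] := by
    rw [hdB, getD_foldl_modify_splice l PySem.Dict.empty k]
    simp [PySem.Dict.getD_empty]
  rw [hvA, hvB, foldl_insertFromRight_eq, PySem.List.sorted_eq_foldl_insertBy]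

-- ===== VERDICT (by name: the statement is the Claim_ definition above) =====
theorem episode_groups_py_spec : Claim_equal_episode_groups_py := by
  intro frames _
  exact episode_groups_py_spec' frames
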